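-- pv_equiv track=rewrite | github.com/sun-hainan/Python | 参数算法/multiple_sequence_alignment.py | score_multiple_alignment
-- ===== SOURCE A (Python) =====
-- def score_multiple_alignment(alignment):
--     """
--     计算多序列比对的得分（SUM_OF_PAIRS）。
--
--     参数:
--         alignment: 对齐后的序列列表
--
--     返回:
--         总得分
--     """
--     if not alignment:
--         return 0
--
--     m = len(alignment[0])
--     n = len(alignment)
--
--     total_score = 0
--     for i in range(m):
--         for p in range(n):
--             for q in range(p + 1, n):
--                 a, b = alignment[p][i], alignment[q][i]
--                 if a == '-' or b == '-':
--                     total_score -= 2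
--                 elif a == b:
--                     total_score += 1
--                 else:
--                     total_score -= 1
--
--     return total_score
-- ===== SOURCE B (Python) =====
-- def score_multiple_alignment(alignment):
--     # Per-column character counts: pair contributions computed combinatorially, O(m*n).
--     if not alignment:
--         return 0
--     m = len(alignment[0])
--     n = len(alignment)
--     total = 0
--     for i in range(m):
--         counts = {}
--         same = 0
--         gaps = 0
--         for s in alignment:
--             c = s[i]
--             if c == '-':
--                 gaps += 1
--             else:
--                 prev = counts.get(c, 0)
--                 same += prev
--                 counts[c] = prev + 1
--         k = n - gaps
--         total += 2 * same + k * (k - 1) // 2 - n * (n - 1)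
--     return total
-- ===== Notes on version B (the rewrite author's own statement) =====
-- stated objective: faster
-- what changed: Replaces the inner all-pairs double loop over rows by a single pass per column that maintains per-character counts (equal-pair count accumulated incrementally) and a gap count, computing the sum-of-pairs score from combinatorial counts.
import Mathlib
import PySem

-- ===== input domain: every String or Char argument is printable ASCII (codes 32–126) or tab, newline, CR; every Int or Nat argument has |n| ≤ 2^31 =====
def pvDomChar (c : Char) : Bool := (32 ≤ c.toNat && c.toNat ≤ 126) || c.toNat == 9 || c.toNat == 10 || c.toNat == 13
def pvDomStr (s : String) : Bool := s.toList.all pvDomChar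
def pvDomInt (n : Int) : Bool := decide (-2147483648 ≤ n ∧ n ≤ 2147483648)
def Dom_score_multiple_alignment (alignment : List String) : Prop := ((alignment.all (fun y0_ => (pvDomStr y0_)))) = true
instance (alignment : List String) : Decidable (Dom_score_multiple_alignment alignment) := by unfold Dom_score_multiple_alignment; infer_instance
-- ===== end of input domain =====

-- B replaces A's per-column all-pairs double loop over rows by one counting pass per column
-- (per-character counts, incremental equal-pair count, gap count) and a combinatorial formula.

-- ===== PORT A =====
def score_multiple_alignment (alignment : List String) : Int :=
  match alignment with
  | [] => 0
  | s0 :: _ =>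
    let m : Int := PySem.List.len s0.toList
    let n : Int := PySem.List.len alignment
    (PySem.List.pyRange 0 m 1).foldl (fun acc i =>
      (PySem.List.pyRange 0 n 1).foldl (fun acc p =>
        (PySem.List.pyRange (p + 1) n 1).foldl (fun acc q =>
          let a := PySem.List.pyGetD (PySem.List.pyGetD alignment p "").toList i ' '
          let b := PySem.List.pyGetD (PySem.List.pyGetD alignment q "").toList i ' '
          if a = '-' ∨ b = '-' then acc - 2
          else if a = b then acc + 1
          else acc - 1) acc) acc) 0

-- ===== PORT B =====
def score_multiple_alignment_alt (alignment : List String) : Int :=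
  match alignment with
  | [] => 0
  | s0 :: _ =>
    let m : Int := PySem.List.len s0.toList
    let n : Int := PySem.List.len alignment
    (PySem.List.pyRange 0 m 1).foldl (fun total i =>
      let st := alignment.foldl (fun (st : PySem.Dict Char Int × Int × Int) s =>
        let c := PySem.List.pyGetD s.toList i ' '
        if c = '-' then (st.1, st.2.1, st.2.2 + 1)
        else
          let prev := st.1.getD c 0
          (st.1.insert c (prev + 1), st.2.1 + prev, st.2.2))
        (PySem.Dict.empty, 0, 0)
      let k := n - st.2.2
      total + 2 * st.2.1 + PySem.Int.floordiv (k * (k - 1)) 2 - n * (n - 1)) 0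

-- ===== PRECONDITION & SPEC =====
-- Pre_: every row is at least as long as the first row — exactly the inputs on which the
-- Python A returns (otherwise alignment[p][i] or alignment[q][i] raises IndexError).
def Pre_score_multiple_alignment (alignment : List String) : Prop :=
  ∀ s ∈ alignment, (alignment.headI).toList.length ≤ s.toList.length
instance (alignment : List String) : Decidable (Pre_score_multiple_alignment alignment) := by
  unfold Pre_score_multiple_alignment; infer_instance
def pvWitness_score_multiple_alignment : List String := ["ab-", "a-c", "abc"]

def Spec_score_multiple_alignment (alignment : List String) (out : Int) : Prop := out = score_multiple_alignment_alt alignment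
instance (alignment : List String) (out : Int) : Decidable (Spec_score_multiple_alignment alignment out) := by unfold Spec_score_multiple_alignment; infer_instance

-- ===== CLAIM (what is proved, stated in full; the proofs are below) =====
def Claim_equal_score_multiple_alignment : Prop := ∀ (alignment : List String), Dom_score_multiple_alignment alignment → Pre_score_multiple_alignment alignment → Spec_score_multiple_alignment alignment (score_multiple_alignment alignment)

-- ===== LEMMAS AND PROOFS =====

-- Pairwise score of two column characters (A's three-way branch).
def pvSc (a b : Char) : Int := if a = '-' ∨ b = '-' then -2 else if a = b then 1 else -1

def pvEqp : List Char → Int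
  | [] => 0
  | x :: xs => (if x = '-' then 0 else (xs.count x : Int)) + pvEqp xs

theorem pvEqp_append_singleton (P : List Char) (x : Char) :
    pvEqp (P ++ [x]) = pvEqp P + (if x = '-' then 0 else (P.count x : Int)) := by
  induction P with
  | nil => simp [pvEqp]
  | cons y ys ih =>
      simp only [List.cons_append, pvEqp, ih, List.count_cons, List.count_append]
      by_cases hy : y = '-' <;> by_cases hx : x = '-' <;> by_cases hxy : x = y <;>
        try simp [hy, hx, hxy]
      all_goals try exact Ne.symm hy
      all_goals try exact Ne.symm hx
      all_goals subst_vars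
      all_goals try split_ifs with h
      all_goals try exact absurd h.symm hxy
      all_goals ring

theorem pvSum_sc_head (x : Char) (xs : List Char) :
    (xs.map (pvSc x)).sum =
      if x = '-' then -2 * (xs.length : Int)
      else 2 * (xs.count x : Int) - ((xs.length : Int) - (xs.count '-' : Int)) - 2 * (xs.count '-' : Int) := by
  induction xs with
  | nil => simp
  | cons y ys ih =>
      simp only [List.map_cons, List.sum_cons, ih, List.count_cons, List.length_cons, pvSc]
      by_cases hx : x = '-' <;> by_cases hy : y = '-' <;> by_cases hxy : x = y <;>
        try simp [hx, hy, hxy]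
      all_goals subst_vars
      all_goals try split_ifs with h
      all_goals try exact absurd h.symm hxy
      all_goals ring

def pvPairSum : List Char → Int
  | [] => 0
  | x :: xs => (xs.map (pvSc x)).sum + pvPairSum xs

theorem pvPairSum_formula (L : List Char) :
    2 * pvPairSum L =
      4 * pvEqp L + ((L.length : Int) - (L.count '-' : Int)) * (((L.length : Int) - (L.count '-' : Int)) - 1)
        - 2 * ((L.length : Int) * ((L.length : Int) - 1)) := by
  induction L with
  | nil => simp [pvPairSum, pvEqp]
  | cons x xs ih =>
      have hc : xs.count '-' ≤ xs.length := List.count_le_length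
      have hcx : xs.count x ≤ xs.length := List.count_le_length
      simp only [pvPairSum, pvEqp, pvSum_sc_head, List.count_cons, List.length_cons]
      by_cases hx : x = '-'
      · simp [hx]; nlinarith [ih]
      · simp [hx]; nlinarith [ih]

theorem pvFloordiv_pair (k : Int) :
    2 * PySem.Int.floordiv (k * (k - 1)) 2 = k * (k - 1) := by
  rw [PySem.Int.floordiv_eq_ediv_of_pos (by norm_num)]
  have h2 : (2 : Int) ∣ k * (k - 1) := by
    rcases Int.even_or_odd k with he | ho
    · exact Dvd.dvd.mul_right he.two_dvd _
    · exact Dvd.dvd.mul_left (Int.even_sub_one.mpr (Int.not_even_iff_odd.mpr ho)).two_dvd _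
  omega

theorem pvMap_getD_range (xs : List Char) (f : Char → Int) (d : Char) :
    (List.range xs.length).map (fun k => f (xs.getD k d)) = xs.map f := by
  apply List.ext_getElem (by simp)
  intro i h1 h2
  simp at h1
  simp [List.getD_eq_getElem?_getD, h1]

theorem pvSumsum (L : List Char) :
    ((List.range L.length).map (fun p =>
      ((List.range (L.length - (p + 1))).map
        (fun k => pvSc (L.getD p ' ') (L.getD (p + 1 + k) ' '))).sum)).sum = pvPairSum L := by
  induction L with
  | nil => simp [pvPairSum]
  | cons x xs ih =>
      rw [List.length_cons, List.range_succ_eq_map]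
      simp only [List.map_cons, List.sum_cons, List.map_map, Function.comp_def, Nat.succ_eq_add_one]
      have h0 : ((List.range (xs.length + 1 - (0 + 1))).map
          (fun k => pvSc ((x :: xs).getD 0 ' ') ((x :: xs).getD (0 + 1 + k) ' '))).sum
          = (xs.map (pvSc x)).sum := by
        have he : ∀ k ∈ List.range xs.length,
            pvSc ((x :: xs).getD 0 ' ') ((x :: xs).getD (0 + 1 + k) ' ') = pvSc x (xs.getD k ' ') := by
          intro k _
          have : (0 + 1 + k) = k + 1 := by omega
          rw [this]
          simp
        rw [Nat.add_sub_cancel, List.map_congr_left he, pvMap_getD_range xs (fun c => pvSc x c) ' ']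
      have h1 : ∀ p ∈ List.range xs.length,
          ((List.range (xs.length + 1 - (p + 1 + 1))).map
            (fun k => pvSc ((x :: xs).getD (p + 1) ' ') ((x :: xs).getD (p + 1 + 1 + k) ' '))).sum
          = ((List.range (xs.length - (p + 1))).map
            (fun k => pvSc (xs.getD p ' ') (xs.getD (p + 1 + k) ' '))).sum := by
        intro p _
        have hl : xs.length + 1 - (p + 1 + 1) = xs.length - (p + 1) := by omega
        rw [hl]
        congr 1
        apply List.map_congr_left
        intro k _
        have h2 : (p + 1 + 1 + k) = (p + 1 + k) + 1 := by omega
        rw [h2]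
        simp
      rw [h0, List.map_congr_left h1, ih]
      rfl

def pvCol (alignment : List String) (i : Int) : List Char :=
  alignment.map (fun s => PySem.List.pyGetD s.toList i ' ')

def pvStep (st : PySem.Dict Char Int × Int × Int) (c : Char) : PySem.Dict Char Int × Int × Int :=
  if c = '-' then (st.1, st.2.1, st.2.2 + 1)
  else (st.1.insert c (st.1.getD c 0 + 1), st.2.1 + st.1.getD c 0, st.2.2)

theorem pvBfold (L : List Char) : ∀ (P : List Char) (d : PySem.Dict Char Int),
    (∀ c, c ≠ '-' → d.getD c 0 = (P.count c : Int)) →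
    (∀ c, c ≠ '-' → (L.foldl pvStep (d, pvEqp P, (P.count '-' : Int))).1.getD c 0 = ((P ++ L).count c : Int))
    ∧ (L.foldl pvStep (d, pvEqp P, (P.count '-' : Int))).2.1 = pvEqp (P ++ L)
    ∧ (L.foldl pvStep (d, pvEqp P, (P.count '-' : Int))).2.2 = ((P ++ L).count '-' : Int) := by
  induction L with
  | nil =>
      intro P d hd
      refine ⟨fun c hc => by simpa using hd c hc, by simp, by simp⟩
  | cons x L ih =>
      intro P d hd
      rw [List.foldl_cons]
      by_cases hx : x = '-'
      · subst hx
        have hstep : pvStep (d, pvEqp P, (P.count '-' : Int)) '-'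
            = (d, pvEqp (P ++ ['-']), ((P ++ ['-']).count '-' : Int)) := by
          simp [pvStep, pvEqp_append_singleton, List.count_append]
        rw [hstep]
        have hd' : ∀ c, c ≠ '-' → d.getD c 0 = ((P ++ ['-']).count c : Int) := by
          intro c hc
          rw [hd c hc, List.count_append]
          have : List.count c ['-'] = 0 := by simp [Ne.symm hc]
          simp [this]
        have := ih (P ++ ['-']) d hd'
        simpa only [← List.append_cons] using this
      · have hstep : pvStep (d, pvEqp P, (P.count '-' : Int)) x
            = (d.insert x ((P.count x : Int) + 1), pvEqp (P ++ [x]), ((P ++ [x]).count '-' : Int)) := by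
          simp [pvStep, hx, hd x hx, pvEqp_append_singleton, List.count_append]
        rw [hstep]
        have hd' : ∀ c, c ≠ '-' → (d.insert x ((P.count x : Int) + 1)).getD c 0 = ((P ++ [x]).count c : Int) := by
          intro c hc
          rw [PySem.Dict.getD_insert]
          by_cases hcx : c = x
          · subst hcx
            simp [List.count_append]
          · rw [if_neg hcx, hd c hc, List.count_append]
            have : List.count c [x] = 0 := by simp [Ne.symm hcx]
            simp [this]
        have := ih (P ++ [x]) (d.insert x ((P.count x : Int) + 1)) hd'
        simpa only [← List.append_cons] using this

theorem pvIf_eq_sc (acc : Int) (a b : Char) :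
    (if a = '-' ∨ b = '-' then acc - 2 else if a = b then acc + 1 else acc - 1) = acc + pvSc a b := by
  unfold pvSc; split_ifs <;> ring

theorem pvG (al : List String) (i : Int) (j : Nat) (h : j < al.length) :
    PySem.List.pyGetD (PySem.List.pyGetD al (j : Int) "").toList i ' ' = (pvCol al i).getD j ' ' := by
  rw [PySem.List.pyGetD_natCast]
  rw [List.getD_eq_getElem al "" h]
  rw [List.getD_eq_getElem (pvCol al i) ' ' (by simpa [pvCol] using h)]
  simp [pvCol]

theorem pvAcol (al : List String) (i acc : Int) :
    (PySem.List.pyRange 0 (PySem.List.len al) 1).foldl (fun acc p =>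
      (PySem.List.pyRange (p + 1) (PySem.List.len al) 1).foldl (fun acc q =>
        if PySem.List.pyGetD (PySem.List.pyGetD al p "").toList i ' ' = '-'
            ∨ PySem.List.pyGetD (PySem.List.pyGetD al q "").toList i ' ' = '-' then acc - 2
        else if PySem.List.pyGetD (PySem.List.pyGetD al p "").toList i ' '
            = PySem.List.pyGetD (PySem.List.pyGetD al q "").toList i ' ' then acc + 1
        else acc - 1) acc) acc
    = acc + pvPairSum (pvCol al i) := by
  have hstep1 : ∀ (acc0 : Int), ∀ p ∈ PySem.List.pyRange 0 (PySem.List.len al) 1,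
      (PySem.List.pyRange (p + 1) (PySem.List.len al) 1).foldl (fun acc q =>
        if PySem.List.pyGetD (PySem.List.pyGetD al p "").toList i ' ' = '-'
            ∨ PySem.List.pyGetD (PySem.List.pyGetD al q "").toList i ' ' = '-' then acc - 2
        else if PySem.List.pyGetD (PySem.List.pyGetD al p "").toList i ' '
            = PySem.List.pyGetD (PySem.List.pyGetD al q "").toList i ' ' then acc + 1
        else acc - 1) acc0
      = acc0 + ((PySem.List.pyRange (p + 1) (PySem.List.len al) 1).map (fun q =>
          pvSc (PySem.List.pyGetD (PySem.List.pyGetD al p "").toList i ' ')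
               (PySem.List.pyGetD (PySem.List.pyGetD al q "").toList i ' '))).sum := by
    intro acc0 p _
    rw [PySem.List.foldl_congr_mem _ _ _ _ (fun acc q _ => pvIf_eq_sc acc _ _)]
    exact PySem.List.foldl_add _ _ _
  rw [PySem.List.foldl_congr_mem _ _ _ _ hstep1, PySem.List.foldl_add]
  congr 1
  rw [PySem.List.len_eq, PySem.List.pyRange_zero_natCast, List.map_map]
  have hterm : ∀ p ∈ List.range al.length,
      ((fun p => ((PySem.List.pyRange (p + 1) (al.length : Int) 1).map (fun q =>
          pvSc (PySem.List.pyGetD (PySem.List.pyGetD al p "").toList i ' ')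
               (PySem.List.pyGetD (PySem.List.pyGetD al q "").toList i ' '))).sum) ∘ (fun k : Nat => (k : Int))) p
      = ((List.range (al.length - (p + 1))).map
          (fun k => pvSc ((pvCol al i).getD p ' ') ((pvCol al i).getD (p + 1 + k) ' '))).sum := by
    intro p hp
    rw [List.mem_range] at hp
    simp only [Function.comp_apply]
    rw [PySem.List.pyRange_one]
    have htn : (((al.length : Int)) - ((p : Int) + 1)).toNat = al.length - (p + 1) := by omega
    rw [htn, List.map_map]
    apply congrArg
    apply List.map_congr_left
    intro k hk
    rw [List.mem_range] at hk
    simp only [Function.comp_apply]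
    have hq : ((p : Int) + 1 + (k : Int)) = ((p + 1 + k : Nat) : Int) := by push_cast; ring
    rw [hq, pvG al i p hp, pvG al i (p + 1 + k) (by omega)]
  rw [List.map_congr_left hterm]
  have hlen : al.length = (pvCol al i).length := by simp [pvCol]
  rw [hlen]
  exact pvSumsum (pvCol al i)

theorem pvBcol (al : List String) (i : Int) :
    al.foldl (fun (st : PySem.Dict Char Int × Int × Int) s =>
        let c := PySem.List.pyGetD s.toList i ' '
        if c = '-' then (st.1, st.2.1, st.2.2 + 1)
        else
          let prev := st.1.getD c 0
          (st.1.insert c (prev + 1), st.2.1 + prev, st.2.2))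
        (PySem.Dict.empty, 0, 0)
    = al.foldl (fun st s => pvStep st (PySem.List.pyGetD s.toList i ' ')) (PySem.Dict.empty, 0, 0) := rfl

theorem pvColScore (al : List String) (i : Int) :
    (al.foldl (fun st s => pvStep st (PySem.List.pyGetD s.toList i ' ')) (PySem.Dict.empty, 0, 0)).2.1
      = pvEqp (pvCol al i)
    ∧ (al.foldl (fun st s => pvStep st (PySem.List.pyGetD s.toList i ' ')) (PySem.Dict.empty, 0, 0)).2.2
      = ((pvCol al i).count '-' : Int) := by
  have h0 : (PySem.Dict.empty, (0 : Int), (0 : Int))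
      = ((PySem.Dict.empty : PySem.Dict Char Int), pvEqp [], ((List.count '-' ([] : List Char) : Nat) : Int)) := by
    simp [pvEqp]
  have hmap : List.foldl pvStep (PySem.Dict.empty, pvEqp [], ((List.count '-' ([] : List Char) : Nat) : Int)) (pvCol al i)
      = List.foldl (fun st s => pvStep st (PySem.List.pyGetD s.toList i ' ')) (PySem.Dict.empty, 0, 0) al := by
    rw [pvCol, List.foldl_map, ← h0]
  rw [← hmap]
  have := pvBfold (pvCol al i) [] PySem.Dict.empty (by intro c hc; simp)
  exact ⟨this.2.1.trans (by simp), this.2.2.trans (by simp)⟩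

theorem pvFinal (alignment : List String) :
    score_multiple_alignment alignment = score_multiple_alignment_alt alignment := by
  cases alignment with
  | nil => rfl
  | cons s0 rest =>
    unfold score_multiple_alignment score_multiple_alignment_alt
    apply PySem.List.foldl_congr_mem
    intro acc i _
    rw [pvAcol (s0 :: rest) i acc]
    rw [pvBcol (s0 :: rest) i]
    obtain ⟨h1, h2⟩ := pvColScore (s0 :: rest) i
    simp only [h1, h2]
    rw [PySem.List.len_eq]
    have hlen : (pvCol (s0 :: rest) i).length = (s0 :: rest).length := by simp [pvCol]
    have hf := pvPairSum_formula (pvCol (s0 :: rest) i)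
    rw [hlen] at hf
    have hdv := pvFloordiv_pair ((((s0 :: rest).length : Int)) - (((pvCol (s0 :: rest) i).count '-' : Nat) : Int))
    linarith

-- ===== VERDICT (by name: the statement is the Claim_ definition above) =====
theorem score_multiple_alignment_spec : Claim_equal_score_multiple_alignment := by
  intro alignment _hdom _hpre
  unfold Spec_score_multiple_alignment
  exact pvFinal alignment
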